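-- pv_equiv track=rewrite | github.com/ylmzelff/terrarium | tests/plain_intersection.py | plain_intersection
-- ===== SOURCE A (Python) =====
-- from typing import List
--
-- def plain_intersection(
--     agent_a: List[int],
--     agent_b: List[int],
-- ) -> List[int]:
--     """
--     Compute the intersection of two binary availability arrays without any
--     cryptographic protocol.
--
--     Both arrays must have identical length.  An index is in the intersection
--     iff both entries equal 1 (bitwise AND).
--
--     Parameters
--     ----------
--     agent_a : list[int]
--         Binary availability vector for Agent A (0 = busy, 1 = available).
--     agent_b : list[int]
--         Binary availability vector for Agent B (0 = busy, 1 = available).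
--
--     Returns
--     -------
--     list[int]
--         Sorted list of slot indices where both agents are available.
--
--     Raises
--     ------
--     ValueError
--         If the two arrays differ in length or contain values other than 0/1.
--
--     Examples
--     --------
--     >>> plain_intersection([0, 1, 1, 0, 1], [1, 1, 0, 0, 1])
--     [1, 4]
--     >>> plain_intersection([0, 0, 0], [0, 0, 0])
--     []
--     >>> plain_intersection([1, 1, 1], [1, 1, 1])
--     [0, 1, 2]
--     """
--     if len(agent_a) != len(agent_b):
--         raise ValueError(
--             f"Arrays must have equal length: got {len(agent_a)} vs {len(agent_b)}"
--         )
--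
--     result: List[int] = []
--     for idx, (a, b) in enumerate(zip(agent_a, agent_b)):
--         if a not in (0, 1) or b not in (0, 1):
--             raise ValueError(
--                 f"Arrays must be binary (0/1). "
--                 f"Got agent_a[{idx}]={a}, agent_b[{idx}]={b}."
--             )
--         if a == 1 and b == 1:
--             result.append(idx)
--
--     return result
-- ===== SOURCE B (Python) =====
-- from typing import List
--
--
-- def plain_intersection(
--     agent_a: List[int],
--     agent_b: List[int],
-- ) -> List[int]:
--     """Set-intersection re-implementation: validate in order, then intersect
--     two index sets instead of testing both entries inline."""
--     if len(agent_a) != len(agent_b):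
--         raise ValueError(
--             f"Arrays must have equal length: got {len(agent_a)} vs {len(agent_b)}"
--         )
--
--     for idx, (a, b) in enumerate(zip(agent_a, agent_b)):
--         if a not in (0, 1) or b not in (0, 1):
--             raise ValueError(
--                 f"Arrays must be binary (0/1). "
--                 f"Got agent_a[{idx}]={a}, agent_b[{idx}]={b}."
--             )
--
--     a_idx = {i for i, v in enumerate(agent_a) if v == 1}
--     b_idx = {i for i, v in enumerate(agent_b) if v == 1}
--     return sorted(a_idx & b_idx)
-- ===== Notes on version B (the rewrite author's own statement) =====
-- stated objective: alternative
-- what changed: B replaces A's single inline collect-as-you-validate loop by a separate in-order validation pass followed by two index-set comprehensions whose set intersection is sorted and returned.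
import Mathlib
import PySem

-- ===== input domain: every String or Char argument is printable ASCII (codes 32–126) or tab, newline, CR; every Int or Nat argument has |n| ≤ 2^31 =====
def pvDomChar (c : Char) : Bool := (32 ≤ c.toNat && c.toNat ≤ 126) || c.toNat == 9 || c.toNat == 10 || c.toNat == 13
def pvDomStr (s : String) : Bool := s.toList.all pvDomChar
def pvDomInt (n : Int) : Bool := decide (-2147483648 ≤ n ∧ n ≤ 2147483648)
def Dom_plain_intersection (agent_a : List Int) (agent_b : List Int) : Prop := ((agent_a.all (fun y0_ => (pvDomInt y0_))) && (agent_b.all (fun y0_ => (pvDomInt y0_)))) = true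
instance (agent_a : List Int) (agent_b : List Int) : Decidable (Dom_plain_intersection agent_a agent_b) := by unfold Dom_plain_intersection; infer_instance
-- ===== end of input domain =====

-- B validates in a separate ordered pass, then intersects two index sets and sorts; same values, same cost (alternative decomposition).


-- ===== PORT A =====
-- one loop over enumerate(zip(..)) appending idx when both entries are 1 (the raising branches are excluded by Pre_)
def plain_intersection (agent_a : List Int) (agent_b : List Int) : List Int :=
  (PySem.List.enumerate (agent_a.zip agent_b)).foldl
    (fun acc p => if p.2.1 = 1 ∧ p.2.2 = 1 then acc ++ [p.1] else acc) []

-- ===== PORT B =====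
-- {i for i, v in enumerate(l) if v == 1}, built as a PySem.Set from the comprehension's element stream
def pvOnes (l : List Int) (s : Int) : List Int :=
  (PySem.List.enumerate l s).filterMap (fun p => if p.2 = 1 then some p.1 else none)

def plain_intersection_alt (agent_a : List Int) (agent_b : List Int) : List Int :=
  let aIdx : PySem.Set Int := PySem.Set.ofList (pvOnes agent_a 0)
  let bIdx : PySem.Set Int := PySem.Set.ofList (pvOnes agent_b 0)
  PySem.List.sorted (PySem.Set.inter aIdx bIdx) (fun x => x)

-- ===== PRECONDITION & SPEC =====
-- Pre_ excludes exactly the inputs where A raises ValueError: unequal lengths or a non-binary entry.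
def Pre_plain_intersection (agent_a : List Int) (agent_b : List Int) : Prop :=
  agent_a.length = agent_b.length ∧ (∀ x ∈ agent_a, x = 0 ∨ x = 1) ∧ (∀ x ∈ agent_b, x = 0 ∨ x = 1)
instance (agent_a : List Int) (agent_b : List Int) : Decidable (Pre_plain_intersection agent_a agent_b) := by
  unfold Pre_plain_intersection; infer_instance

def pvWitness_plain_intersection : List Int × List Int := ([0, 1, 1, 0, 1], [1, 1, 0, 0, 1])

def Spec_plain_intersection (agent_a : List Int) (agent_b : List Int) (out : List Int) : Prop := out = plain_intersection_alt agent_a agent_b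
instance (agent_a : List Int) (agent_b : List Int) (out : List Int) : Decidable (Spec_plain_intersection agent_a agent_b out) := by unfold Spec_plain_intersection; infer_instance

-- ===== CLAIM (what is proved, stated in full; the proofs are below) =====
def Claim_equal_plain_intersection : Prop := ∀ (agent_a : List Int) (agent_b : List Int), Dom_plain_intersection agent_a agent_b → Pre_plain_intersection agent_a agent_b → Spec_plain_intersection agent_a agent_b (plain_intersection agent_a agent_b)

-- ===== LEMMAS AND PROOFS =====

lemma pvOnes_nil (s : Int) : pvOnes [] s = [] := rfl

lemma pvOnes_cons (x : Int) (l : List Int) (s : Int) :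
    pvOnes (x :: l) s = if x = 1 then s :: pvOnes l (s + 1) else pvOnes l (s + 1) := by
  simp [pvOnes, PySem.List.enumerate_cons, List.filterMap_cons]
  split_ifs <;> rfl

lemma le_of_mem_pvOnes (l : List Int) : ∀ (s i : Int), i ∈ pvOnes l s → s ≤ i := by
  induction l with
  | nil => intro s i h; simp [pvOnes_nil] at h
  | cons x t ih =>
    intro s i h
    rw [pvOnes_cons] at h
    split_ifs at h with hx
    · rcases List.mem_cons.1 h with h | h
      · omega
      · have := ih (s + 1) i h; omega
    · have := ih (s + 1) i h; omega

lemma pairwise_lt_pvOnes (l : List Int) : ∀ (s : Int), (pvOnes l s).Pairwise (· < ·) := by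
  induction l with
  | nil => intro s; simp [pvOnes_nil]
  | cons x t ih =>
    intro s
    rw [pvOnes_cons]
    split_ifs with hx
    · exact List.Pairwise.cons (fun i hi => by have := le_of_mem_pvOnes t (s + 1) i hi; omega) (ih (s + 1))
    · exact ih (s + 1)

lemma filter_pvOnes_zip (agent_a : List Int) : ∀ (agent_b : List Int) (s : Int),
    agent_a.length = agent_b.length →
    (pvOnes agent_a s).filter (fun i => (pvOnes agent_b s).contains i) =
      ((PySem.List.enumerate (agent_a.zip agent_b) s).filter
        (fun p => decide (p.2.1 = 1 ∧ p.2.2 = 1))).map (·.1) := by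
  induction agent_a with
  | nil => intro b s h; cases b <;> simp_all [pvOnes_nil, PySem.List.enumerate_nil]
  | cons x ta ih =>
    intro b s h
    cases b with
    | nil => simp at h
    | cons y tb =>
      have hlen : ta.length = tb.length := by simpa using h
      have hcongr : ∀ i ∈ pvOnes ta (s + 1),
          ((s :: pvOnes tb (s + 1)).contains i) = ((pvOnes tb (s + 1)).contains i) := by
        intro i hi
        have hs : s + 1 ≤ i := le_of_mem_pvOnes ta (s + 1) i hi
        simp only [List.contains_cons, Bool.or_eq_right_iff_imp, beq_iff_eq]
        intro he; omega
      rw [List.zip_cons_cons, PySem.List.enumerate_cons, pvOnes_cons, pvOnes_cons,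
        List.filter_cons]
      by_cases hx : x = 1 <;> by_cases hy : y = 1
      · rw [if_pos hx, if_pos hy, List.filter_cons]
        have h1 : ((s :: pvOnes tb (s + 1)).contains s) = true := by
          simp
        rw [h1]
        simp only [hx, hy, and_self, decide_true, if_true, List.map_cons]
        rw [List.filter_congr hcongr, ih tb (s + 1) hlen]
      · rw [if_pos hx, if_neg hy, List.filter_cons]
        have h0 : ((pvOnes tb (s + 1)).contains s) = false := by
          simp only [List.contains_eq_mem, decide_eq_false_iff_not]
          intro hm; have := le_of_mem_pvOnes tb (s + 1) s hm; omega
        rw [h0]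
        simp only [hx, hy, and_false, decide_false, if_false, Bool.false_eq_true]
        exact ih tb (s + 1) hlen
      · rw [if_neg hx, if_pos hy]
        simp only [hx, hy, false_and, decide_false, if_false, Bool.false_eq_true]
        rw [List.filter_congr hcongr]
        exact ih tb (s + 1) hlen
      · rw [if_neg hx, if_neg hy]
        simp only [hx, hy, false_and, decide_false, if_false, Bool.false_eq_true]
        exact ih tb (s + 1) hlen

-- ===== VERDICT (by name: the statement is the Claim_ definition above) =====
theorem plain_intersection_spec : Claim_equal_plain_intersection := by
  intro agent_a agent_b _ hpre
  obtain ⟨hlen, -, -⟩ := hpre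
  unfold Spec_plain_intersection plain_intersection plain_intersection_alt
  have hfun : (fun (acc : List Int) (p : Int × (Int × Int)) =>
      if p.2.1 = 1 ∧ p.2.2 = 1 then acc ++ [p.1] else acc)
      = (fun acc p =>
        if (fun q : Int × (Int × Int) => decide (q.2.1 = 1 ∧ q.2.2 = 1)) p = true
        then acc ++ [p.1] else acc) := by
    funext acc p; simp only [decide_eq_true_eq]
  rw [hfun, PySem.List.foldl_append_if, List.nil_append]
  have hNa : (pvOnes agent_a 0).Nodup := (pairwise_lt_pvOnes agent_a 0).imp ne_of_lt
  have hNb : (pvOnes agent_b 0).Nodup := (pairwise_lt_pvOnes agent_b 0).imp ne_of_lt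
  show _ = PySem.List.sorted
    (PySem.Set.inter (PySem.Set.ofList (pvOnes agent_a 0)) (PySem.Set.ofList (pvOnes agent_b 0)))
    (fun x => x)
  rw [PySem.Set.ofList_eq_self_of_nodup _ hNa, PySem.Set.ofList_eq_self_of_nodup _ hNb]
  have hinter : PySem.Set.inter (pvOnes agent_a 0) (pvOnes agent_b 0)
      = (pvOnes agent_a 0).filter (fun i => (pvOnes agent_b 0).contains i) := rfl
  rw [hinter]
  have hpw : ((pvOnes agent_a 0).filter (fun i => (pvOnes agent_b 0).contains i)).Pairwise (· < ·) :=
    List.Pairwise.filter _ (pairwise_lt_pvOnes agent_a 0)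
  rw [PySem.List.sorted_eq_of_perm_of_pairwise_lt _ _ _ (List.Perm.refl _) hpw]
  exact (filter_pvOnes_zip agent_a agent_b 0 hlen).symm
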